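-- pv_equiv track=rewrite | github.com/KMORaza/leetcode-solutions | LeetCode Solutions/2231.py | largestInteger
-- ===== SOURCE A (Python) =====
-- def largestInteger(num: int) -> int:
--     digits = [int(d) for d in str(num)]
--     even_digits = sorted((d for d in digits if d % 2 == 0), reverse=True)
--     odd_digits = sorted((d for d in digits if d % 2 != 0), reverse=True)
--     result = []
--     even_index = 0
--     odd_index = 0
--     for d in digits:
--         if d % 2 == 0:
--             result.append(even_digits[even_index])
--             even_index += 1
--         else:
--             result.append(odd_digits[odd_index])
--             odd_index += 1
--     return int(''.join(map(str, result)))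
-- ===== SOURCE B (Python) =====
-- def largestInteger(num: int) -> int:
--     digits = [int(c) for c in str(num)]
--
--     def select(ds):
--         # one exchange pass: bubble the largest digit of ds[0]'s parity to the
--         # front, displacing overtaken digits into the remainder, then recurse
--         if not ds:
--             return []
--         h = ds[0]
--         out = []
--         for x in ds[1:]:
--             if (h - x) % 2 == 0 and x > h:
--                 out.append(h)
--                 h = x
--             else:
--                 out.append(x)
--         return [h] + select(out)
--
--     result = 0
--     for d in select(digits):
--         result = result * 10 + d
--     return result
-- ===== Notes on version B (the rewrite author's own statement) =====
-- stated objective: alternative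
-- what changed: Replaced A's sort-the-two-parity-lists-then-merge-by-index-pointers strategy by a recursive parity-restricted exchange selection: no sorting and no parity lists at all; each pass scans once, bubbling the largest digit of the head's parity to the front while displaced digits fall into the remainder, and recursion continues on that remainder; the result is accumulated arithmetically (out*10+d) instead of joining strings. Pre_ excludes negative num, on which both programs raise ValueError on the '-' character.
import Mathlib
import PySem

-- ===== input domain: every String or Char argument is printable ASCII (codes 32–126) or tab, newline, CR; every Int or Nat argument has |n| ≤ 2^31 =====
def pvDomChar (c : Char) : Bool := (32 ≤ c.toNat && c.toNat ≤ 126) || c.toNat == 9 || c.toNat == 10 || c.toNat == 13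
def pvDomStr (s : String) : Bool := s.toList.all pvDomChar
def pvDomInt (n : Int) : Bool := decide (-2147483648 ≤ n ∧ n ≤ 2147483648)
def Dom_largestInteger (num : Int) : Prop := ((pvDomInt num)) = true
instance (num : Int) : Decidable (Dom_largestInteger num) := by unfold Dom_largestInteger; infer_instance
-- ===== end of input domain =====

-- B replaces A's two sorted parity lists merged by index pointers with a recursive
-- parity-restricted exchange selection (no sorting, no parity lists; objective: alternative).


-- ===== PORT A =====
-- the body of A's for-loop, named: state (result, even_index, odd_index)
def pvStepA (ev od : List Int) : (List Int × Nat × Nat) → Int → (List Int × Nat × Nat) :=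
  fun st d =>
    if PySem.Int.mod d 2 == 0 then
      (st.1 ++ [(PySem.List.pyGet? ev (st.2.1 : Int)).getD 0], st.2.1 + 1, st.2.2)
    else
      (st.1 ++ [(PySem.List.pyGet? od (st.2.2 : Int)).getD 0], st.2.1, st.2.2 + 1)

def largestInteger (num : Int) : Int :=
  -- digits = [int(d) for d in str(num)]  (int(c) on a single digit char is its code minus 48; exact on Pre_, where all chars are '0'..'9')
  let digits : List Int := (PySem.Int.toChars num).map (fun c => ((c.toNat : Int) - 48))
  let even_digits := PySem.List.sorted (digits.filter (fun d => PySem.Int.mod d 2 == 0)) (fun x => x) true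
  let odd_digits := PySem.List.sorted (digits.filter (fun d => !(PySem.Int.mod d 2 == 0))) (fun x => x) true
  -- xs[index] is in range on Pre_ (the counts match), so .getD 0 is never used
  let st := digits.foldl (pvStepA even_digits odd_digits) ([], 0, 0)
  -- int(''.join(map(str, result))) ported as the base-10 fold; exact on Pre_, where result is a nonempty list of digits 0–9
  st.1.foldl (fun a d => 10 * a + d) 0

-- ===== PORT B =====
-- the body of B's inner for-loop, named: state (h, out)
def pvSelStep (st : Int × List Int) (x : Int) : Int × List Int :=
  if PySem.Int.mod (st.1 - x) 2 == 0 && st.1 < x then (x, st.2 ++ [st.1]) else (st.1, st.2 ++ [x])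

-- the inner pass keeps the length (cited by pvSel's decreasing_by)
lemma pvSelStep_len : ∀ (xs : List Int) (st : Int × List Int),
    (xs.foldl pvSelStep st).2.length = st.2.length + xs.length := by
  intro xs
  induction xs with
  | nil => intro st; simp
  | cons x xs ih =>
    intro st
    rw [List.foldl_cons]
    by_cases hc : (PySem.Int.mod (st.1 - x) 2 == 0 && decide (st.1 < x)) = true
    · rw [show pvSelStep st x = (x, st.2 ++ [st.1]) from by simp only [pvSelStep, if_pos hc], ih]
      simp
      omega
    · rw [show pvSelStep st x = (st.1, st.2 ++ [x]) from by simp only [pvSelStep, if_neg hc], ih]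
      simp
      omega

-- select(ds): one exchange pass bubbling the largest same-parity digit to the front, then recurse
def pvSel : List Int → List Int
  | [] => []
  | h :: rest =>
    let p := rest.foldl pvSelStep (h, [])
    p.1 :: pvSel p.2
termination_by l => l.length
decreasing_by simp [pvSelStep_len]

def largestInteger_alt (num : Int) : Int :=
  let digits : List Int := (PySem.Int.toChars num).map (fun c => ((c.toNat : Int) - 48))
  (pvSel digits).foldl (fun a d => a * 10 + d) 0

-- ===== PRECONDITION & SPEC =====
-- Pre_ excludes negative num: there str(num) starts with '-' and int('-') raises ValueError in both programs.
def Pre_largestInteger (num : Int) : Prop := 0 ≤ num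
instance (num : Int) : Decidable (Pre_largestInteger num) := by unfold Pre_largestInteger; infer_instance
def pvWitness_largestInteger : Int := 1234

def Spec_largestInteger (num : Int) (out : Int) : Prop := out = largestInteger_alt num
instance (num : Int) (out : Int) : Decidable (Spec_largestInteger num out) := by unfold Spec_largestInteger; infer_instance

-- ===== CLAIM (what is proved, stated in full; the proofs are below) =====
def Claim_equal_largestInteger : Prop := ∀ (num : Int), Dom_largestInteger num → Pre_largestInteger num → Spec_largestInteger num (largestInteger num)

-- ===== LEMMAS AND PROOFS =====

-- parity test, as A's loop writes it
def pvQ (d : Int) : Bool := PySem.Int.mod d 2 == 0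

-- B's parity test agrees with comparing pvQ of the two operands
lemma pvPar (h x : Int) : (PySem.Int.mod (h - x) 2 == 0) = (pvQ h == pvQ x) := by
  simp only [pvQ, PySem.Int.mod_eq_emod_of_pos (by norm_num : (0:Int) < 2)]
  rcases Int.emod_two_eq h with h1 | h1 <;> rcases Int.emod_two_eq x with h2 | h2 <;>
    simp [h1, h2, beq_iff_eq] <;> omega

-- the common intermediate value: the original digits with each position replaced by the
-- next unused element of its parity's descending list
def pvAssemble : List Int → List Int → List Int → List Int
  | [], _, _ => []
  | d :: ds, ev, od =>
    if pvQ d then ev.headD 0 :: pvAssemble ds ev.tail od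
    else od.headD 0 :: pvAssemble ds ev od.tail

-- structural form of B's inner fold
def pvInner : Int → List Int → Int × List Int
  | h, [] => (h, [])
  | h, x :: xs =>
    if PySem.Int.mod (h - x) 2 == 0 && h < x then ((pvInner x xs).1, h :: (pvInner x xs).2)
    else ((pvInner h xs).1, x :: (pvInner h xs).2)

lemma pvFoldSel : ∀ (xs : List Int) (h : Int) (acc : List Int),
    xs.foldl pvSelStep (h, acc) = ((pvInner h xs).1, acc ++ (pvInner h xs).2) := by
  intro xs
  induction xs with
  | nil => intro h acc; simp [pvInner]
  | cons x xs ih =>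
    intro h acc
    rw [List.foldl_cons]
    by_cases hc : (PySem.Int.mod (h - x) 2 == 0 && decide (h < x)) = true
    · rw [show pvSelStep (h, acc) x = (x, acc ++ [h]) from by simp only [pvSelStep, if_pos hc], ih]
      rw [pvInner]
      rw [if_pos hc]
      simp
    · rw [show pvSelStep (h, acc) x = (h, acc ++ [x]) from by simp only [pvSelStep, if_neg hc], ih]
      rw [pvInner]
      rw [if_neg hc]
      simp

lemma pvInner_perm : ∀ (xs : List Int) (h : Int),
    ((pvInner h xs).1 :: (pvInner h xs).2).Perm (h :: xs) := by
  intro xs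
  induction xs with
  | nil => intro h; simp [pvInner]
  | cons x xs ih =>
    intro h
    unfold pvInner
    split
    · exact (List.Perm.swap _ _ _).trans ((ih x).cons h)
    · exact ((List.Perm.swap _ _ _).trans ((ih h).cons x)).trans (List.Perm.swap _ _ _)

lemma pvInner_parity : ∀ (xs : List Int) (h : Int), pvQ (pvInner h xs).1 = pvQ h := by
  intro xs
  induction xs with
  | nil => intro h; simp [pvInner]
  | cons x xs ih =>
    intro h
    unfold pvInner
    split
    · rename_i hc
      have hpar : pvQ h = pvQ x := by
        have := (Bool.and_eq_true _ _).mp hc |>.1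
        rw [pvPar] at this
        exact beq_iff_eq.mp this
      rw [ih x, hpar]
    · exact ih h

lemma pvInner_pattern : ∀ (xs : List Int) (h : Int),
    (pvInner h xs).2.map pvQ = xs.map pvQ := by
  intro xs
  induction xs with
  | nil => intro h; simp [pvInner]
  | cons x xs ih =>
    intro h
    unfold pvInner
    split
    · rename_i hc
      have hpar : pvQ h = pvQ x := by
        have := (Bool.and_eq_true _ _).mp hc |>.1
        rw [pvPar] at this
        exact beq_iff_eq.mp this
      simp [ih x, hpar]
    · simp [ih h]

lemma pvInner_max : ∀ (xs : List Int) (h : Int), ∀ y ∈ h :: xs, pvQ y = pvQ h → y ≤ (pvInner h xs).1 := by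
  intro xs
  induction xs with
  | nil =>
    intro h y hy _
    rw [List.mem_singleton] at hy
    subst hy
    simp [pvInner]
  | cons x xs ih =>
    intro h y hy hq
    unfold pvInner
    split
    · rename_i hc
      obtain ⟨hp, hlt⟩ := (Bool.and_eq_true _ _).mp hc
      rw [pvPar] at hp
      have hpar : pvQ h = pvQ x := beq_iff_eq.mp hp
      have hlt' : h < x := of_decide_eq_true hlt
      rcases List.mem_cons.mp hy with rfl | hy'
      · exact le_of_lt (lt_of_lt_of_le hlt' (ih x x (List.mem_cons_self ..) rfl))
      · rcases List.mem_cons.mp hy' with rfl | hy''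
        · exact ih y y (List.mem_cons_self ..) rfl
        · exact ih x y (List.mem_cons_of_mem _ hy'') (hq.trans hpar)
    · rename_i hc
      rcases List.mem_cons.mp hy with rfl | hy'
      · exact ih y y (List.mem_cons_self ..) rfl
      · rcases List.mem_cons.mp hy' with rfl | hy''
        · by_cases hpar : pvQ y = pvQ h
          · have hle : ¬ h < y := by
              intro hlt
              apply hc
              rw [Bool.and_eq_true, pvPar]
              exact ⟨beq_iff_eq.mpr hpar.symm, decide_eq_true hlt⟩
            exact le_trans (le_of_not_gt hle) (ih h h (List.mem_cons_self ..) rfl)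
          · exact absurd hq hpar
        · exact ih h y (List.mem_cons_of_mem _ hy'') hq

-- descending sort, as both sides use it / are related to it
def pvSortD (l : List Int) : List Int := PySem.List.sorted l (fun x => x) true

lemma pvSortD_pairwise (l : List Int) : (pvSortD l).Pairwise (fun a b => b ≤ a) := by
  simpa using PySem.List.sorted_pairwise_rev l (fun x => x)

lemma pvSortD_sorted_id {l : List Int} (h : l.Pairwise (fun a b => b ≤ a)) : pvSortD l = l :=
  List.Perm.eq_of_pairwise (fun _ _ _ _ h1 h2 => le_antisymm h2 h1) (pvSortD_pairwise l) h
    (PySem.List.sorted_perm l (fun x => x) true)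

lemma pvSortD_perm_eq {l m : List Int} (h : l.Perm m) : pvSortD l = pvSortD m :=
  List.Perm.eq_of_pairwise (fun _ _ _ _ h1 h2 => le_antisymm h2 h1) (pvSortD_pairwise l) (pvSortD_pairwise m)
    ((PySem.List.sorted_perm l (fun x => x) true).trans (h.trans (PySem.List.sorted_perm m (fun x => x) true).symm))

-- pvAssemble only reads the parity pattern of its first argument
lemma pvAssemble_pattern : ∀ (ds ds' : List Int), ds.map pvQ = ds'.map pvQ →
    ∀ ev od, pvAssemble ds ev od = pvAssemble ds' ev od := by
  intro ds
  induction ds with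
  | nil => intro ds' h ev od; cases ds' with
    | nil => rfl
    | cons d' ds' => simp at h
  | cons d ds ih =>
    intro ds' h ev od
    cases ds' with
    | nil => simp at h
    | cons d' ds' =>
      simp only [List.map_cons, List.cons.injEq] at h
      obtain ⟨h1, h2⟩ := h
      unfold pvAssemble
      rw [h1]
      by_cases hq : pvQ d'
      · rw [if_pos hq, if_pos hq, ih ds' h2]
      · rw [if_neg hq, if_neg hq, ih ds' h2]

-- B's select equals pvAssemble with the two descending parity lists
lemma pvSel_assemble : ∀ (n : Nat) (ds : List Int), ds.length ≤ n →
    pvSel ds = pvAssemble ds (pvSortD (ds.filter pvQ)) (pvSortD (ds.filter (fun d => !(pvQ d)))) := by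
  intro n
  induction n with
  | zero =>
    intro ds h
    rw [Nat.le_zero, List.length_eq_zero_iff] at h
    subst h
    simp [pvSel, pvAssemble]
  | succ n ih =>
    intro ds hlen
    cases ds with
    | nil => simp [pvSel, pvAssemble]
    | cons h rest =>
      rw [pvSel]
      simp only [pvFoldSel rest h []]
      set m := (pvInner h rest).1 with hm
      set r' := (pvInner h rest).2 with hr'
      simp only [List.nil_append]
      have hperm : (m :: r').Perm (h :: rest) := pvInner_perm rest h
      have hrlen : r'.length = rest.length := by
        have := hperm.length_eq
        simpa using this
      have hih := ih r' (by simp at hlen; omega)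
      have hpat := pvInner_pattern rest h
      have hqm : pvQ m = pvQ h := pvInner_parity rest h
      by_cases hq : pvQ h = true
      · -- head even-parity class
        have hfilter : (h :: rest).filter pvQ = h :: rest.filter pvQ := by
          rw [List.filter_cons, if_pos hq]
        have hpermf : (m :: r'.filter pvQ).Perm ((h :: rest).filter pvQ) := by
          have := hperm.filter pvQ
          rwa [List.filter_cons, if_pos (hqm.trans hq)] at this
        -- the sorted even list is nonempty
        obtain ⟨e₀, etail, hev⟩ : ∃ e₀ etail, pvSortD ((h :: rest).filter pvQ) = e₀ :: etail := by
          have : pvSortD ((h :: rest).filter pvQ) ≠ [] := by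
            intro hnil
            have := (PySem.List.sorted_perm ((h :: rest).filter pvQ) (fun x => x) true).symm.length_eq
            rw [pvSortD] at hnil
            rw [hnil, hfilter] at this
            simp at this
          cases hx : pvSortD ((h :: rest).filter pvQ) with
          | nil => exact absurd hx this
          | cons a b => exact ⟨a, b, rfl⟩
        have hpw := pvSortD_pairwise ((h :: rest).filter pvQ)
        rw [hev] at hpw
        have hpermev : (m :: r'.filter pvQ).Perm (e₀ :: etail) := by
          refine hpermf.trans ?_
          rw [← hev]
          exact (PySem.List.sorted_perm _ _ _).symm
        -- m = e₀
        have hme : m = e₀ := by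
          have hm_mem : m ∈ e₀ :: etail := hpermev.subset (List.mem_cons_self ..)
          have h1 : m ≤ e₀ := by
            rcases List.mem_cons.mp hm_mem with rfl | hmem
            · exact le_refl _
            · exact (List.pairwise_cons.mp hpw).1 m hmem
          have he₀_mem : e₀ ∈ (h :: rest).filter pvQ := by
            have : e₀ ∈ pvSortD ((h :: rest).filter pvQ) := by rw [hev]; exact List.mem_cons_self ..
            rwa [pvSortD, PySem.List.mem_sorted] at this
          have h2 : e₀ ≤ m := by
            obtain ⟨hmem, hqe⟩ := List.mem_filter.mp he₀_mem
            exact pvInner_max rest h e₀ hmem (hqe.trans hq.symm)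
          exact le_antisymm h1 h2
        subst hme
        have hpermtail : (r'.filter pvQ).Perm etail := hpermev.cons_inv
        have hsort_ev : pvSortD (r'.filter pvQ) = etail :=
          (pvSortD_perm_eq hpermtail).trans (pvSortD_sorted_id (List.pairwise_cons.mp hpw).2)
        have hsort_od : pvSortD (r'.filter (fun d => !(pvQ d))) = pvSortD ((h :: rest).filter (fun d => !(pvQ d))) := by
          apply pvSortD_perm_eq
          have := hperm.filter (fun d => !(pvQ d))
          rwa [List.filter_cons, if_neg (by simp [hqm, hq])] at this
        rw [hih, hsort_ev, hsort_od, pvAssemble_pattern r' rest hpat]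
        conv_rhs => rw [pvAssemble]
        rw [if_pos hq, hev]
        simp
      · -- head odd-parity class: symmetric
        have hqf : pvQ h = false := by simpa using hq
        have hq' : (!(pvQ h)) = true := by simp [hqf]
        have hqm' : (!(pvQ m)) = true := by simp [hqm, hqf]
        have hpermf : (m :: r'.filter (fun d => !(pvQ d))).Perm ((h :: rest).filter (fun d => !(pvQ d))) := by
          have := hperm.filter (fun d => !(pvQ d))
          rwa [List.filter_cons, if_pos hqm'] at this
        obtain ⟨o₀, otail, hod⟩ : ∃ o₀ otail, pvSortD ((h :: rest).filter (fun d => !(pvQ d))) = o₀ :: otail := by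
          have : pvSortD ((h :: rest).filter (fun d => !(pvQ d))) ≠ [] := by
            intro hnil
            have := (PySem.List.sorted_perm ((h :: rest).filter (fun d => !(pvQ d))) (fun x => x) true).symm.length_eq
            rw [pvSortD] at hnil
            rw [hnil, List.filter_cons, if_pos hq'] at this
            simp at this
          cases hx : pvSortD ((h :: rest).filter (fun d => !(pvQ d))) with
          | nil => exact absurd hx this
          | cons a b => exact ⟨a, b, rfl⟩
        have hpw := pvSortD_pairwise ((h :: rest).filter (fun d => !(pvQ d)))
        rw [hod] at hpw
        have hpermod : (m :: r'.filter (fun d => !(pvQ d))).Perm (o₀ :: otail) := by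
          refine hpermf.trans ?_
          rw [← hod]
          exact (PySem.List.sorted_perm _ _ _).symm
        have hme : m = o₀ := by
          have hm_mem : m ∈ o₀ :: otail := hpermod.subset (List.mem_cons_self ..)
          have h1 : m ≤ o₀ := by
            rcases List.mem_cons.mp hm_mem with rfl | hmem
            · exact le_refl _
            · exact (List.pairwise_cons.mp hpw).1 m hmem
          have ho₀_mem : o₀ ∈ (h :: rest).filter (fun d => !(pvQ d)) := by
            have : o₀ ∈ pvSortD ((h :: rest).filter (fun d => !(pvQ d))) := by rw [hod]; exact List.mem_cons_self ..
            rwa [pvSortD, PySem.List.mem_sorted] at this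
          have h2 : o₀ ≤ m := by
            obtain ⟨hmem, hqe⟩ := List.mem_filter.mp ho₀_mem
            apply pvInner_max rest h o₀ hmem
            simp only [Bool.not_eq_true'] at hqe
            rw [hqe, hqf]
          exact le_antisymm h1 h2
        subst hme
        have hpermtail : (r'.filter (fun d => !(pvQ d))).Perm otail := hpermod.cons_inv
        have hsort_od : pvSortD (r'.filter (fun d => !(pvQ d))) = otail :=
          (pvSortD_perm_eq hpermtail).trans (pvSortD_sorted_id (List.pairwise_cons.mp hpw).2)
        have hsort_ev : pvSortD (r'.filter pvQ) = pvSortD ((h :: rest).filter pvQ) := by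
          apply pvSortD_perm_eq
          have := hperm.filter pvQ
          rwa [List.filter_cons, if_neg (by simp [hqm, hqf])] at this
        rw [hih, hsort_ev, hsort_od, pvAssemble_pattern r' rest hpat]
        conv_rhs => rw [pvAssemble]
        rw [if_neg (by simp [hqf]), hod]
        simp
  
-- pulling the accumulated result out of A's fold
lemma pvFoldA_acc (ev od : List Int) (R : List Int) : ∀ (acc : List Int) (i j : Nat),
    List.foldl (pvStepA ev od) (acc, i, j) R
      = (acc ++ (List.foldl (pvStepA ev od) ([], i, j) R).1,
         (List.foldl (pvStepA ev od) ([], i, j) R).2) := by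
  induction R with
  | nil => intro acc i j; simp
  | cons d R ih =>
    intro acc i j
    by_cases h : PySem.Int.mod d 2 == 0
    · simp only [List.foldl_cons, pvStepA, if_pos h]
      rw [ih (acc ++ _), ih ([] ++ _)]
      simp
    · simp only [List.foldl_cons, pvStepA, if_neg h]
      rw [ih (acc ++ _), ih ([] ++ _)]
      simp

-- A's pointer loop equals pvAssemble on the dropped sorted lists
lemma pvFoldA_assemble (ev od : List Int) : ∀ (L : List Int) (i j : Nat),
    i + L.countP pvQ ≤ ev.length → j + L.countP (fun d => !(pvQ d)) ≤ od.length →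
    (List.foldl (pvStepA ev od) ([], i, j) L).1 = pvAssemble L (ev.drop i) (od.drop j) := by
  intro L
  induction L with
  | nil => intro i j _ _; simp [pvAssemble]
  | cons d L ih =>
    intro i j hi hj
    rw [List.countP_cons] at hi hj
    by_cases hq : pvQ d = true
    · have hi' : i + 1 + L.countP pvQ ≤ ev.length := by simp [hq] at hi; omega
      have hj' : j + L.countP (fun d => !(pvQ d)) ≤ od.length := by simp [hq] at hj; omega
      have hilt : i < ev.length := by omega
      have hdrop : ev.drop i = ev[i] :: ev.drop (i + 1) := List.drop_eq_getElem_cons hilt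
      have hget : (PySem.List.pyGet? ev (i : Int)).getD 0 = ev[i] := by
        rw [PySem.List.pyGet?_natCast, List.getElem?_eq_getElem hilt, Option.getD_some]
      simp only [List.foldl_cons, pvStepA, if_pos (show (PySem.Int.mod d 2 == 0) = true from hq)]
      rw [pvFoldA_acc, hget]
      simp only [List.nil_append]
      rw [ih (i + 1) j hi' hj']
      conv_rhs => rw [pvAssemble]
      rw [if_pos hq, hdrop]
      simp [List.getElem?_eq_getElem hilt]
    · have hqf : pvQ d = false := by simpa using hq
      have hi' : i + L.countP pvQ ≤ ev.length := by simp [hqf] at hi; omega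
      have hj' : j + 1 + L.countP (fun d => !(pvQ d)) ≤ od.length := by simp [hqf] at hj; omega
      have hjlt : j < od.length := by omega
      have hdrop : od.drop j = od[j] :: od.drop (j + 1) := List.drop_eq_getElem_cons hjlt
      have hget : (PySem.List.pyGet? od (j : Int)).getD 0 = od[j] := by
        rw [PySem.List.pyGet?_natCast, List.getElem?_eq_getElem hjlt, Option.getD_some]
      have hq2 : (PySem.Int.mod d 2 == 0) = false := hqf
      simp only [List.foldl_cons, pvStepA, hq2, Bool.false_eq_true, if_false]
      rw [pvFoldA_acc, hget]
      simp only [List.nil_append]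
      rw [ih i (j + 1) hi' hj']
      conv_rhs => rw [pvAssemble]
      rw [if_neg (by simp [hqf]), hdrop]
      simp [List.getElem?_eq_getElem hjlt]

-- the two base-10 folds agree
lemma pvFold10 : ∀ (L : List Int) (a : Int),
    L.foldl (fun a d => 10 * a + d) a = L.foldl (fun a d => a * 10 + d) a := by
  intro L
  induction L with
  | nil => intro a; rfl
  | cons d L ih => intro a; rw [List.foldl_cons, List.foldl_cons, ih, mul_comm]

lemma pvPorts_eq (num : Int) : largestInteger num = largestInteger_alt num := by
  unfold largestInteger largestInteger_alt
  simp only []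
  set ds := (PySem.Int.toChars num).map (fun c => ((c.toNat : Int) - 48)) with hds
  have hfilter_ev : ds.filter (fun d => PySem.Int.mod d 2 == 0) = ds.filter pvQ := rfl
  have hfilter_od : ds.filter (fun d => !(PySem.Int.mod d 2 == 0)) = ds.filter (fun d => !(pvQ d)) := rfl
  rw [hfilter_ev, hfilter_od]
  set ev := PySem.List.sorted (ds.filter pvQ) (fun x => x) true with hev
  set od := PySem.List.sorted (ds.filter (fun d => !(pvQ d))) (fun x => x) true with hod
  have hevlen : ds.countP pvQ = ev.length := by
    rw [hev, PySem.List.length_sorted, List.countP_eq_length_filter]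
  have hodlen : ds.countP (fun d => !(pvQ d)) = od.length := by
    rw [hod, PySem.List.length_sorted, List.countP_eq_length_filter]
  rw [pvFoldA_assemble ev od ds 0 0 (by omega) (by omega)]
  rw [pvSel_assemble ds.length ds (le_refl _)]
  rw [List.drop_zero, List.drop_zero]
  simp only [pvSortD]
  rw [← hev, ← hod]
  exact pvFold10 _ 0

-- ===== VERDICT (by name: the statement is the Claim_ definition above) =====
theorem largestInteger_spec : Claim_equal_largestInteger := by
  intro num _ _
  exact pvPorts_eq num
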